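-- pv_equiv track=rewrite | github.com/LumiaBlack51/Bai | backend/analyzer/stdlib_helper.py | _parse_format_string
-- ===== SOURCE A (Python) =====
-- from typing import Iterable, List, Sequence
--
-- PRINTF_SPECIFIERS = set("diuoxXfFeEgGaAcsp")
--
-- def _parse_format_string(fmt: str) -> List[str]:
--     specifiers: List[str] = []
--     i = 0
--     while i < len(fmt):
--         if fmt[i] == "%":
--             i += 1
--             if i < len(fmt) and fmt[i] == "%":
--                 i += 1
--                 continue
--             while i < len(fmt) and fmt[i] not in PRINTF_SPECIFIERS:
--                 i += 1
--             if i < len(fmt):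
--                 specifiers.append(fmt[i])
--                 i += 1
--             continue
--         i += 1
--     return specifiers
-- ===== SOURCE B (Python) =====
-- PRINTF_SPECIFIERS = set("diuoxXfFeEgGaAcsp")
--
-- def _first_spec(part):
--     for c in part:
--         if c in PRINTF_SPECIFIERS:
--             return c
--     return None
--
-- def _parse_format_string(fmt):
--     specifiers = []
--     mode = "lit"  # first segment of the split is plain literal text
--     for part in fmt.split("%"):
--         if mode == "lit":
--             mode = "spec"          # next segment follows a '%'
--         elif mode == "spec":
--             if part == "":
--                 mode = "lit"       # '%%' escape: the following segment is literal
--             else: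
--                 c = _first_spec(part)
--                 if c is None:
--                     mode = "scan"  # spec continues across the next '%'
--                 else:
--                     specifiers.append(c)
--         else:  # "scan": still looking for the specifier of an open conversion
--             c = _first_spec(part)
--             if c is not None:
--                 specifiers.append(c)
--                 mode = "spec"
--     return specifiers
-- ===== Notes on version B (the rewrite author's own statement) =====
-- stated objective: faster
-- what changed: A's per-character index-driven scan with a nested skip-loop is replaced by two stages: split the string on '%' once, then process the resulting segments wholesale, taking the first specifier character of a segment (or carrying the open conversion into the next segment); the per-character Python-level loop disappears into bulk str.split, which is the constant-factor win.
import Mathlib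
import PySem

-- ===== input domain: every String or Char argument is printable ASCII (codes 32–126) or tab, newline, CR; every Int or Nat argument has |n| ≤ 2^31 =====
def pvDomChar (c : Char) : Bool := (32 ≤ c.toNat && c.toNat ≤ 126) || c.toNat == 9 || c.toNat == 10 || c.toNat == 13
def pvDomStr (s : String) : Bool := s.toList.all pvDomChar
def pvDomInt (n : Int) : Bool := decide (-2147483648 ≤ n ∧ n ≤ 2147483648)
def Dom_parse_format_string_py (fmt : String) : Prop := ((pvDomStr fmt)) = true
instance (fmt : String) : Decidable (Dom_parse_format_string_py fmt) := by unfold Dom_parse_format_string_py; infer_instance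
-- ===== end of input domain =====

-- B replaces A's index-driven scan with nested skip-loop by a two-stage pass:
-- split on '%' once, then process the segments wholesale (objective: alternative).

-- ===== PORT A =====
-- PRINTF_SPECIFIERS = set("diuoxXfFeEgGaAcsp")
def pvSpecChars : List Char := "diuoxXfFeEgGaAcsp".toList

-- inner `while i < len(fmt) and fmt[i] not in PRINTF_SPECIFIERS: i += 1`
def pvSkip (s : List Char) (i : Nat) : Nat :=
  if h : i < s.length then
    if s[i] ∈ pvSpecChars then i else pvSkip s (i + 1)
  else i
termination_by s.length - i

lemma pvSkip_le (s : List Char) (i : Nat) : i ≤ pvSkip s i := by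
  fun_induction pvSkip s i with
  | case1 => omega
  | case2 i h hmem ih => omega
  | case3 => omega

-- outer `while i < len(fmt)` loop, accumulator = `specifiers`
def pvALoop (s : List Char) (i : Nat) (acc : List String) : List String :=
  if h : i < s.length then
    if s[i] = '%' then
      -- i += 1
      if h1 : i + 1 < s.length then
        if s[i + 1] = '%' then
          pvALoop s (i + 2) acc
        else
          let j := pvSkip s (i + 1)
          if hj : j < s.length then
            pvALoop s (j + 1) (acc ++ [String.ofList [s[j]]])
          else acc
      else acc
    else pvALoop s (i + 1) acc
  else acc
termination_by s.length - i
decreasing_by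
  · omega
  · have := pvSkip_le s (i + 1); omega
  · omega

def parse_format_string_py (fmt : String) : List String :=
  pvALoop fmt.toList 0 []

-- ===== PORT B =====
-- fmt.split('%') — hand port of Python str.split with a one-character separator,
-- exact for that case (keeps empty segments, never drops anything)
def pvSplit (s : List Char) : List (List Char) :=
  match s with
  | [] => [[]]
  | c :: rest =>
    if c = '%' then [] :: pvSplit rest
    else
      match pvSplit rest with
      | p :: ps => (c :: p) :: ps
      | [] => [[c]]

-- `_first_spec(part)`
def pvFirstSpec (part : List Char) : Option Char :=
  part.find? (fun c => c ∈ pvSpecChars)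

-- the `for part in fmt.split('%')` loop; mode 0 = "lit", 1 = "spec", 2 = "scan"
def pvBLoop (mode : Nat) (parts : List (List Char)) (acc : List String) : List String :=
  match parts with
  | [] => acc
  | part :: rest =>
    if mode = 0 then pvBLoop 1 rest acc
    else if mode = 1 then
      if part = [] then pvBLoop 0 rest acc
      else
        match pvFirstSpec part with
        | none => pvBLoop 2 rest acc
        | some c => pvBLoop 1 rest (acc ++ [String.ofList [c]])
    else
      match pvFirstSpec part with
      | none => pvBLoop 2 rest acc
      | some c => pvBLoop 1 rest (acc ++ [String.ofList [c]])

def parse_format_string_py_alt (fmt : String) : List String :=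
  pvBLoop 0 (pvSplit fmt.toList) []

-- ===== PRECONDITION & SPEC =====
def Spec_parse_format_string_py (fmt : String) (out : List String) : Prop := out = parse_format_string_py_alt fmt
instance (fmt : String) (out : List String) : Decidable (Spec_parse_format_string_py fmt out) := by unfold Spec_parse_format_string_py; infer_instance

-- ===== CLAIM (what is proved, stated in full; the proofs are below) =====
def Claim_equal_parse_format_string_py : Prop := ∀ (fmt : String), Dom_parse_format_string_py fmt → Spec_parse_format_string_py fmt (parse_format_string_py fmt)

-- ===== LEMMAS AND PROOFS =====

-- what A does right after consuming a '%', standing at index i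
def pvAfterPct (s : List Char) (i : Nat) (acc : List String) : List String :=
  if _ : i < s.length then
    if s[i] = '%' then pvALoop s (i + 1) acc
    else
      let j := pvSkip s i
      if _ : j < s.length then pvALoop s (j + 1) (acc ++ [String.ofList [s[j]]])
      else acc
  else acc

-- what A does while inside the skip loop at index i
def pvSkipPhase (s : List Char) (i : Nat) (acc : List String) : List String :=
  let j := pvSkip s i
  if _ : j < s.length then pvALoop s (j + 1) (acc ++ [String.ofList [s[j]]])
  else acc

lemma pvALoop_eq (s : List Char) (i : Nat) (acc : List String) :
    pvALoop s i acc =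
      if h : i < s.length then
        if s[i] = '%' then pvAfterPct s (i + 1) acc
        else pvALoop s (i + 1) acc
      else acc := by
  rw [pvALoop, pvAfterPct]

lemma pvSkip_eq_of_notmem (s : List Char) (i : Nat) (h : i < s.length)
    (hm : s[i] ∉ pvSpecChars) : pvSkip s i = pvSkip s (i + 1) := by
  rw [pvSkip]; simp [h, hm]

lemma pvSkip_self (s : List Char) (i : Nat) (h : i < s.length)
    (hm : s[i] ∈ pvSpecChars) : pvSkip s i = i := by
  rw [pvSkip]; simp [h, hm]

lemma pvSkip_stop (s : List Char) (i : Nat) (h : ¬ i < s.length) : pvSkip s i = i := by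
  rw [pvSkip]; simp [h]

lemma pvSplit_ne_nil (s : List Char) : pvSplit s ≠ [] := by
  cases s with
  | nil => simp [pvSplit]
  | cons c r =>
    rw [pvSplit]
    split
    · simp
    · cases h : pvSplit r <;> simp

lemma pvSplit_cons_pct (r : List Char) : pvSplit ('%' :: r) = [] :: pvSplit r := by
  rw [pvSplit]; simp

lemma pvSplit_cons_ne (c : Char) (r : List Char) (hc : c ≠ '%') :
    ∃ p ps, pvSplit r = p :: ps ∧ pvSplit (c :: r) = (c :: p) :: ps := by
  cases h : pvSplit r with
  | nil => exact absurd h (pvSplit_ne_nil r)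
  | cons p ps =>
    refine ⟨p, ps, rfl, ?_⟩
    rw [pvSplit]; simp [hc, h]

lemma pvFirstSpec_cons_notmem (c : Char) (p : List Char) (hm : c ∉ pvSpecChars) :
    pvFirstSpec (c :: p) = pvFirstSpec p := by
  simp [pvFirstSpec, List.find?, hm]

lemma pvFirstSpec_cons_mem (c : Char) (p : List Char) (hm : c ∈ pvSpecChars) :
    pvFirstSpec (c :: p) = some c := by
  simp [pvFirstSpec, List.find?, hm]

-- mode "spec" on a nonempty segment behaves exactly like mode "scan"
lemma pvBLoop_one_eq_two (part : List Char) (ps : List (List Char)) (acc : List String)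
    (hne : part ≠ []) : pvBLoop 1 (part :: ps) acc = pvBLoop 2 (part :: ps) acc := by
  rw [pvBLoop, pvBLoop]; simp [hne]

lemma pvBLoop_two_drop (c : Char) (p : List Char) (ps : List (List Char)) (acc : List String)
    (hm : c ∉ pvSpecChars) :
    pvBLoop 2 ((c :: p) :: ps) acc = pvBLoop 2 (p :: ps) acc := by
  rw [pvBLoop, pvBLoop]
  simp [pvFirstSpec_cons_notmem c p hm]

lemma pvMain (s : List Char) (n : Nat) :
    ∀ i acc, s.length - i ≤ n →
      pvBLoop 0 (pvSplit (s.drop i)) acc = pvALoop s i acc ∧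
      pvBLoop 1 (pvSplit (s.drop i)) acc = pvAfterPct s i acc ∧
      pvBLoop 2 (pvSplit (s.drop i)) acc = pvSkipPhase s i acc := by
  induction n with
  | zero =>
    intro i acc hn
    have hi : ¬ i < s.length := by omega
    have hd : s.drop i = [] := List.drop_eq_nil_of_le (by omega)
    have hs := pvSkip_stop s i hi
    rw [pvALoop, pvAfterPct, pvSkipPhase]
    simp [hd, pvSplit, pvBLoop, pvFirstSpec, hi, hs]
  | succ n ih =>
    intro i acc hn
    by_cases hi : i < s.length
    · have hd : s.drop i = s[i] :: s.drop (i + 1) := List.drop_eq_getElem_cons hi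
      by_cases hp : s[i] = '%'
      · -- current char is '%'
        have hsp : pvSplit (s.drop i) = [] :: pvSplit (s.drop (i + 1)) := by
          rw [hd, hp, pvSplit_cons_pct]
        have hskip : pvSkip s i = pvSkip s (i + 1) :=
          pvSkip_eq_of_notmem s i hi (by rw [hp]; decide)
        refine ⟨?_, ?_, ?_⟩
        · rw [hsp, pvBLoop, pvALoop_eq]
          simp only [hi, dite_true, hp, if_true]
          exact (ih (i + 1) acc (by omega)).2.1
        · rw [hsp, pvBLoop]
          norm_num
          rw [pvAfterPct]
          simp only [hi, dite_true, hp, if_true]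
          exact (ih (i + 1) acc (by omega)).1
        · rw [hsp, pvBLoop]
          norm_num [pvFirstSpec, List.find?]
          rw [(ih (i + 1) acc (by omega)).2.2]
          unfold pvSkipPhase
          rw [hskip]
      · -- current char is not '%'
        obtain ⟨p, ps, hrec, hsp⟩ := pvSplit_cons_ne s[i] (s.drop (i + 1)) hp
        have hsp' : pvSplit (s.drop i) = (s[i] :: p) :: ps := by rw [hd, hsp]
        -- conjunct (a): mode 0 ignores the segment; A just steps over a literal char
        have ha : pvBLoop 0 (pvSplit (s.drop i)) acc = pvALoop s i acc := by
          have h01 : pvBLoop 0 ((s[i] :: p) :: ps) acc = pvBLoop 0 (p :: ps) acc := by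
            rw [pvBLoop, pvBLoop]; norm_num
          rw [hsp', h01, ← hrec, (ih (i + 1) acc (by omega)).1, pvALoop_eq s i acc]
          simp [hi, hp]
        by_cases hm : s[i] ∈ pvSpecChars
        · -- specifier found right here
          have hskip : pvSkip s i = i := pvSkip_self s i hi hm
          have hfind := pvFirstSpec_cons_mem s[i] p hm
          have h2 : pvBLoop 2 ((s[i] :: p) :: ps) acc =
              pvALoop s (i + 1) (acc ++ [String.ofList [s[i]]]) := by
            rw [pvBLoop]
            norm_num [hfind]
            have h01 : pvBLoop 0 (p :: ps) (acc ++ [String.ofList [s[i]]]) =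
                pvBLoop 1 ps (acc ++ [String.ofList [s[i]]]) := by
              rw [pvBLoop]; norm_num
            have hB := (ih (i + 1) (acc ++ [String.ofList [s[i]]]) (by omega)).1
            rw [hrec] at hB
            rw [← h01, hB]
          have hAfter : pvAfterPct s i acc =
              pvALoop s (i + 1) (acc ++ [String.ofList [s[i]]]) := by
            rw [pvAfterPct]
            simp only [hi, dite_true, hp, if_false, hskip]
          have hSk : pvSkipPhase s i acc =
              pvALoop s (i + 1) (acc ++ [String.ofList [s[i]]]) := by
            unfold pvSkipPhase
            simp [hskip, hi]
          refine ⟨ha, ?_, ?_⟩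
          · rw [hsp', pvBLoop_one_eq_two _ _ _ (by simp), h2, hAfter]
          · rw [hsp', h2, hSk]
        · -- not a specifier: skip it
          have hskip : pvSkip s i = pvSkip s (i + 1) := pvSkip_eq_of_notmem s i hi hm
          have hsk : pvSkipPhase s i acc = pvSkipPhase s (i + 1) acc := by
            unfold pvSkipPhase; rw [hskip]
          have h2 : pvBLoop 2 ((s[i] :: p) :: ps) acc = pvSkipPhase s i acc := by
            rw [pvBLoop_two_drop _ _ _ _ hm, ← hrec,
              (ih (i + 1) acc (by omega)).2.2, hsk]
          have hAfter : pvAfterPct s i acc = pvSkipPhase s i acc := by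
            rw [pvAfterPct]
            simp only [hi, dite_true, hp, if_false]
            unfold pvSkipPhase
            rfl
          refine ⟨ha, ?_, ?_⟩
          · rw [hsp', pvBLoop_one_eq_two _ _ _ (by simp), h2, hAfter]
          · rw [hsp', h2]
    · have hd : s.drop i = [] := List.drop_eq_nil_of_le (by omega)
      have hs := pvSkip_stop s i hi
      rw [pvALoop, pvAfterPct, pvSkipPhase]
      simp [hd, pvSplit, pvBLoop, pvFirstSpec, hi, hs]

-- ===== VERDICT (by name: the statement is the Claim_ definition above) =====
theorem parse_format_string_py_spec : Claim_equal_parse_format_string_py := by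
  intro fmt _
  unfold Spec_parse_format_string_py parse_format_string_py parse_format_string_py_alt
  have h := (pvMain fmt.toList fmt.toList.length 0 [] (by omega)).1
  simpa using h.symm
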